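-- pv_equiv track=rewrite | github.com/klausxie/sql-optimizer-skill | python/sqlopt/scripting/branch_strategy.py | generate
-- ===== SOURCE A (Python) =====
-- from typing import TYPE_CHECKING, List
--
-- def generate(
--     conditions: List[str], max_branches: int = 100
-- ) -> List[List[str]]:
--     """Generate all 2^n combinations.
--
--     Args:
--         conditions: List of condition strings.
--         max_branches: Maximum branches to generate.
--
--     Returns:
--         List of combinations, each containing conditions to activate.
--     """
--     if not conditions:
--         return [[]]
--
--     n = len(conditions)
--     max_possible = 2**n
--
--     # If we can generate all combinations within limit
--     if max_possible <= max_branches: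
--         combinations = []
--         for mask in range(max_possible):
--             combo = []
--             for i in range(n):
--                 if mask & (1 << i):
--                     combo.append(conditions[i])
--             combinations.append(combo)
--         return combinations
--
--     # Otherwise, generate subset (prioritize edge cases)
--     combinations = []
--
--     # Always include: all false, all true
--     combinations.append([])  # All false
--     combinations.append(conditions.copy())  # All true
--
--     # Add individual conditions
--     for i, cond in enumerate(conditions):
--         if len(combinations) >= max_branches:
--             break
--         combinations.append([cond])
--
--     # Fill remaining with random combinations
--     for mask in range(max_possible):
--         if len(combinations) >= max_branches:
--             break
--         combo = []
--         for i in range(n):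
--             if mask & (1 << i):
--                 combo.append(conditions[i])
--         if combo not in combinations:
--             combinations.append(combo)
--
--     return combinations[:max_branches]
-- ===== SOURCE B (Python) =====
-- from typing import List
--
--
-- def generate(
--     conditions: List[str], max_branches: int = 100
-- ) -> List[List[str]]:
--     """Generate all 2^n combinations (full branch by power-set doubling)."""
--     if not conditions:
--         return [[]]
--
--     n = len(conditions)
--     max_possible = 2 ** n
--
--     # Full enumeration: classic iterative power-set doubling (binary-counting order).
--     if max_possible <= max_branches:
--         combos = [[]]
--         for cond in conditions:
--             combos += [c + [cond] for c in combos]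
--         return combos
--
--     # Subset: seed the edge cases directly, then fill by counting masks lazily.
--     combos = [[], conditions.copy()]
--     combos += [[c] for c in conditions[:max(0, max_branches - 2)]]
--
--     mask = 0
--     while len(combos) < max_branches and mask < max_possible:
--         combo = [c for i, c in enumerate(conditions) if (mask >> i) & 1]
--         if combo not in combos:
--             combos.append(combo)
--         mask += 1
--
--     return combos[:max_branches]
-- ===== Notes on version B (the rewrite author's own statement) =====
-- stated objective: idiomatic
-- what changed: The full-enumeration branch replaces the nested mask/bit loops with iterative power-set doubling (combos += [c+[cond] for c in combos]), and the subset branch's singleton loop becomes a direct slice-based seed while keeping the lazy early-breaking mask fill.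
import Mathlib
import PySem

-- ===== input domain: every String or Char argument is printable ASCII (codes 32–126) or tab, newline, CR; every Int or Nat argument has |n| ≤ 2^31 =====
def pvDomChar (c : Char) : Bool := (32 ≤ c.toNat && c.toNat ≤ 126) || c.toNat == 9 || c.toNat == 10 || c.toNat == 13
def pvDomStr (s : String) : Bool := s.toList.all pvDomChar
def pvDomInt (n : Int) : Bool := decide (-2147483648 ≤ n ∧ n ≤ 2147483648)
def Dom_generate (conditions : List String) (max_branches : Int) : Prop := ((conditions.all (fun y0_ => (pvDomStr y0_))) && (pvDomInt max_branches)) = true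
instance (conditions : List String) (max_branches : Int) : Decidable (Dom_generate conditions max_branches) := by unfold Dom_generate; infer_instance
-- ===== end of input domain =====

-- B replaces A's nested mask/bit loops of the full-enumeration branch by iterative
-- power-set doubling, and seeds the subset branch's singletons by a slice (objective: idiomatic).

-- ===== PORT A =====
-- inner loop 'for i in range(n): if mask & (1 << i): combo.append(conditions[i])';
-- i is always in range so conditions[i] is getD i ""; masks come from range(2**n) so they
-- are nonnegative and modelled as Nat (bitwise &, << are exact on Nat)
def pvComboA (conditions : List String) (n : Nat) (mask : Nat) : List String :=
  (List.range n).foldl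
    (fun combo i => if mask &&& (1 <<< i) != 0 then combo ++ [conditions.getD i ""] else combo) []

-- 'for i, cond in enumerate(conditions): if len(combinations) >= max_branches: break; combinations.append([cond])'
def pvSinglesA (max_branches : Int) : List (List String) → List String → List (List String)
  | acc, [] => acc
  | acc, c :: rest =>
    if (acc.length : Int) ≥ max_branches then acc
    else pvSinglesA max_branches (acc ++ [[c]]) rest

-- 'for mask in range(max_possible): …' with its early break; fuel = number of masks still to visit
def pvMaskLoopA (conditions : List String) (n : Nat) (max_branches : Int) : Nat → Nat → List (List String) → List (List String)
  | _, 0, acc => acc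
  | mask, fuel+1, acc =>
    if (acc.length : Int) ≥ max_branches then acc
    else
      pvMaskLoopA conditions n max_branches (mask+1) fuel
        (if pvComboA conditions n mask ∈ acc then acc else acc ++ [pvComboA conditions n mask])

def generate (conditions : List String) (max_branches : Int) : List (List String) :=
  if conditions = [] then [[]]
  else
    let n := conditions.length
    let maxPossible : Nat := 2 ^ n
    if (maxPossible : Int) ≤ max_branches then
      (List.range maxPossible).foldl (fun acc mask => acc ++ [pvComboA conditions n mask]) []
    else
      PySem.List.slice
        (pvMaskLoopA conditions n max_branches 0 maxPossible
          (pvSinglesA max_branches [[], conditions] conditions))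
        none (some max_branches)

-- ===== PORT B =====
-- '[c for i, c in enumerate(conditions) if (mask >> i) & 1]' (enumerate indices are nonnegative)
def pvComboB (conditions : List String) (mask : Nat) : List String :=
  ((PySem.List.enumerate conditions 0).filter
      (fun p => (mask >>> p.1.toNat) &&& 1 == 1)).map (fun p => p.2)

-- 'while len(combos) < max_branches and mask < max_possible: …'; fuel bounds the loop
-- (the condition mask < max_possible keeps it faithful)
def pvWhileB (conditions : List String) (maxPossible : Nat) (max_branches : Int) : Nat → List (List String) → Nat → List (List String)
  | _, combos, 0 => combos
  | mask, combos, fuel+1 =>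
    if (combos.length : Int) < max_branches ∧ mask < maxPossible then
      pvWhileB conditions maxPossible max_branches (mask+1)
        (if pvComboB conditions mask ∈ combos then combos else combos ++ [pvComboB conditions mask]) fuel
    else combos

def generate_alt (conditions : List String) (max_branches : Int) : List (List String) :=
  if conditions = [] then [[]]
  else
    let n := conditions.length
    let maxPossible : Nat := 2 ^ n
    if (maxPossible : Int) ≤ max_branches then
      conditions.foldl (fun combos cond => combos ++ combos.map (fun c => c ++ [cond])) [[]]
    else
      let seed := [[], conditions] ++
        (PySem.List.slice conditions none (some (max 0 (max_branches - 2)))).map (fun c => [c])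
      PySem.List.slice (pvWhileB conditions maxPossible max_branches 0 seed maxPossible)
        none (some max_branches)

-- ===== PRECONDITION & SPEC =====
def Spec_generate (conditions : List String) (max_branches : Int) (out : List (List String)) : Prop := out = generate_alt conditions max_branches
instance (conditions : List String) (max_branches : Int) (out : List (List String)) : Decidable (Spec_generate conditions max_branches out) := by unfold Spec_generate; infer_instance

-- ===== CLAIM (what is proved, stated in full; the proofs are below) =====
def Claim_equal_generate : Prop := ∀ (conditions : List String) (max_branches : Int), Dom_generate conditions max_branches → Spec_generate conditions max_branches (generate conditions max_branches)

-- ===== LEMMAS AND PROOFS =====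

-- canonical description of the combination selected by a bitmask
def pvCanon (cs : List String) (mask : Nat) : List String :=
  ((List.range cs.length).filter (fun i => mask.testBit i)).map (fun i => cs.getD i "")

theorem pvBitA (m i : Nat) : (m &&& (1 <<< i) != 0) = m.testBit i := by
  simp [Nat.one_shiftLeft, Nat.and_two_pow]
  cases h : m.testBit i <;> simp

theorem pvComboA_eq (cs : List String) (mask : Nat) :
    pvComboA cs cs.length mask = pvCanon cs mask := by
  unfold pvComboA pvCanon
  rw [PySem.List.foldl_append_if]
  simp only [List.nil_append]
  congr 1
  exact List.filter_congr (fun i _ => pvBitA mask i)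

theorem pvComboB_eq (cs : List String) (mask : Nat) :
    pvComboB cs mask = pvCanon cs mask := by
  unfold pvComboB pvCanon
  rw [PySem.List.enumerate_eq_map_pyRange (d := ""), PySem.List.len_eq, PySem.List.pyRange_zero_nat]
  simp only [List.map_map, List.filter_map, Function.comp_def, Int.toNat_natCast]
  rw [List.filter_congr (q := fun i => mask.testBit i) (fun i _ => by simp [Nat.testBit])]
  simp

theorem pvCanon_low (ds : List String) (x : String) (m : Nat) (h : m < 2 ^ ds.length) :
    pvCanon (ds ++ [x]) m = pvCanon ds m := by
  unfold pvCanon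
  rw [List.length_append, List.length_singleton, List.range_succ, List.filter_append]
  simp only [List.filter_singleton, Nat.testBit_lt_two_pow h, Bool.cond_false, List.append_nil]
  apply List.map_congr_left
  intro i hi
  have hik : i < ds.length := (List.mem_range).1 (List.mem_of_mem_filter hi)
  rw [List.getD_append _ _ _ _ hik]

theorem pvCanon_high (ds : List String) (x : String) (m : Nat) (h : m < 2 ^ ds.length) :
    pvCanon (ds ++ [x]) (2 ^ ds.length + m) = pvCanon ds m ++ [x] := by
  unfold pvCanon
  rw [List.length_append, List.length_singleton, List.range_succ, List.filter_append]
  have hk : (2 ^ ds.length + m).testBit ds.length = true := by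
    rw [Nat.testBit_two_pow_add_eq]
    simp [Nat.testBit_lt_two_pow h]
  simp only [List.filter_singleton, hk, Bool.cond_true, List.map_append]
  congr 1
  · have hfil : (List.range ds.length).filter (fun i => (2 ^ ds.length + m).testBit i)
        = (List.range ds.length).filter (fun i => m.testBit i) := by
      apply List.filter_congr
      intro i hi
      exact Nat.testBit_two_pow_add_gt ((List.mem_range).1 hi) m
    rw [hfil]
    apply List.map_congr_left
    intro i hi
    have hik : i < ds.length := (List.mem_range).1 (List.mem_of_mem_filter hi)
    rw [List.getD_append _ _ _ _ hik]
  · simp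

theorem pvDoubling_eq (cs : List String) :
    cs.foldl (fun combos cond => combos ++ combos.map (fun c => c ++ [cond])) [[]]
      = (List.range (2 ^ cs.length)).map (pvCanon cs) := by
  induction cs using List.reverseRecOn with
  | nil => simp [pvCanon]
  | append_singleton ds x ih =>
    rw [List.foldl_append]
    simp only [List.foldl_cons, List.foldl_nil]
    rw [ih, List.length_append, List.length_singleton, pow_succ, Nat.mul_two, List.range_add]
    rw [List.map_append, List.map_map, List.map_map]
    congr 1
    · apply List.map_congr_left
      intro m hm
      exact (pvCanon_low ds x m ((List.mem_range).1 hm)).symm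
    · apply List.map_congr_left
      intro m hm
      exact (pvCanon_high ds x m ((List.mem_range).1 hm)).symm

theorem pvSingles_eq (mb : Int) (cs : List String) : ∀ acc : List (List String),
    pvSinglesA mb acc cs = acc ++ (cs.take (mb - acc.length).toNat).map (fun c => [c]) := by
  induction cs with
  | nil => intro acc; simp [pvSinglesA]
  | cons c rest ih =>
    intro acc
    rw [pvSinglesA]
    by_cases h : (acc.length : Int) ≥ mb
    · rw [if_pos h]
      have : (mb - acc.length).toNat = 0 := by omega
      simp [this]
    · rw [if_neg h, ih]
      have h1 : (mb - acc.length).toNat = (mb - (acc.length + 1)).toNat + 1 := by omega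
      simp only [List.length_append, List.length_singleton, List.append_assoc]
      rw [h1]
      simp [List.take_succ_cons]
theorem pvLoops_eq (cs : List String) (M : Nat) (mb : Int) : ∀ (fuel mask : Nat)
    (acc : List (List String)), mask + fuel = M →
    pvMaskLoopA cs cs.length mb mask fuel acc = pvWhileB cs M mb mask acc fuel := by
  intro fuel
  induction fuel with
  | zero => intro mask acc _; rfl
  | succ fuel ih =>
    intro mask acc hM
    rw [pvMaskLoopA, pvWhileB]
    by_cases h : (acc.length : Int) ≥ mb
    · rw [if_pos h, if_neg (show ¬((acc.length : Int) < mb ∧ mask < M) by omega)]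
    · have hc : (acc.length : Int) < mb ∧ mask < M := by omega
      rw [if_neg h, if_pos hc, pvComboB_eq, ← pvComboA_eq]
      exact ih (mask + 1) _ (by omega)

theorem pv_main (cs : List String) (mb : Int) : generate cs mb = generate_alt cs mb := by
  unfold generate generate_alt
  by_cases hnil : cs = []
  · simp [hnil]
  · rw [if_neg hnil, if_neg hnil]
    by_cases hb : ((2 ^ cs.length : Nat) : Int) ≤ mb
    · rw [if_pos hb, if_pos hb]
      rw [PySem.List.foldl_append_singleton_eq_map, List.nil_append, pvDoubling_eq]
      exact List.map_congr_left (fun m _ => pvComboA_eq cs m)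
    · rw [if_neg hb, if_neg hb]
      congr 1
      rw [pvSingles_eq, PySem.List.slice_to cs (le_max_left 0 (mb - 2))]
      have h2 : (mb - (([[], cs] : List (List String)).length : Int)).toNat
          = (max 0 (mb - 2)).toNat := by simp; omega
      rw [h2]
      exact pvLoops_eq cs (2 ^ cs.length) mb (2 ^ cs.length) 0 _ (by omega)

-- ===== VERDICT (by name: the statement is the Claim_ definition above) =====
theorem generate_spec : Claim_equal_generate := by
  intro cs mb _
  unfold Spec_generate
  exact pv_main cs mb
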